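-- pv_equiv track=rewrite | github.com/Dequs/HEXEC | utils/functions.py | textToBase42
-- ===== SOURCE A (Python) =====
-- alphabet = "0123456789ABCDEFGHIJKLMNOPQRSTUVWXYZabcdef"
--
-- def textToBase42(text):
--     data = text.encode("utf-8")
--     num = int.from_bytes(data, "big")
--     if num == 0:
--         return alphabet[0]
--     result = ""
--     while num > 0:
--         num, rem = divmod(num, 42)
--         result = alphabet[rem] + result
--     return result
-- ===== SOURCE B (Python) =====
-- alphabet = "0123456789ABCDEFGHIJKLMNOPQRSTUVWXYZabcdef"
--
-- def textToBase42(text):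
--     num = int.from_bytes(text.encode("utf-8"), "big")
--     # find a power-of-two digit width w with num < 42**w, by repeated squaring
--     w = 1
--     while 42 ** w <= num:
--         w *= 2
--     # divide and conquer: digits of n left-padded with '0' to width w (a power of two)
--     def rec(n, w):
--         if w == 1:
--             return alphabet[n]
--         h = w // 2
--         hi, lo = divmod(n, 42 ** h)
--         return rec(hi, h) + rec(lo, h)
--     s = rec(num, w).lstrip(alphabet[0])
--     return s if s else alphabet[0]
-- ===== Notes on version B (the rewrite author's own statement) =====
-- stated objective: faster
-- what changed: Replaces the digit-at-a-time loop with quadratic string prepending by a divide-and-conquer base conversion that splits the number by powers of 42 found via repeated squaring, then strips the leading zero padding.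
import Mathlib
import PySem

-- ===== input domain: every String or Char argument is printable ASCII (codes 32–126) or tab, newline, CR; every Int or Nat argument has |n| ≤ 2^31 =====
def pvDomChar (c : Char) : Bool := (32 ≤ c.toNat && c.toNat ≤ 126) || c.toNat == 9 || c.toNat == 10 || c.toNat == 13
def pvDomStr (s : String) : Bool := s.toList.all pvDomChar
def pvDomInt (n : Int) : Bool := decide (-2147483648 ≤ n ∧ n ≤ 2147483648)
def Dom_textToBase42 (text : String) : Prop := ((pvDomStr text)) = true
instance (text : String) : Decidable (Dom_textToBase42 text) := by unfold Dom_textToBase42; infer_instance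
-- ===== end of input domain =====

-- B replaces A's digit-at-a-time loop (quadratic string prepending) by divide-and-conquer
-- base conversion (split by powers of 42, strip the zero padding): measurably faster.

-- ===== PORT A =====
def pvAlphabet : List Char := "0123456789ABCDEFGHIJKLMNOPQRSTUVWXYZabcdef".toList

-- text.encode("utf-8") + int.from_bytes(data, "big"): exact on the ASCII domain Dom_,
-- where each character is one byte equal to its code point.
def pvFromBytes (text : String) : Nat :=
  text.toList.foldl (fun acc c => acc * 256 + c.toNat) 0

-- alphabet[rem] with 0 ≤ rem < 42, so the Python indexing never raises; getD is exact there.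
def pvDigitChar (d : Nat) : Char := pvAlphabet.getD d ' '

-- while num > 0: num, rem = divmod(num, 42); result = alphabet[rem] + result
def pvLoopA (num : Nat) (result : List Char) : List Char :=
  if h : 0 < num then pvLoopA (num / 42) (pvDigitChar (num % 42) :: result)
  else result
termination_by num
decreasing_by exact Nat.div_lt_self h (Nat.lt_of_sub_eq_succ rfl)

def textToBase42 (text : String) : String :=
  if pvFromBytes text = 0 then String.mk [pvDigitChar 0]
  else String.mk (pvLoopA (pvFromBytes text) [])

-- ===== PORT B =====
-- w = 1; while 42 ** w <= num: w *= 2   (invariant 1 ≤ w carried as a proof argument for termination)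
theorem pvFindW_le (w : Nat) (hw : 1 ≤ w) : 1 ≤ 2 * w :=
  Nat.le_trans hw (Nat.le_mul_of_pos_left w (Nat.lt_of_sub_eq_succ rfl))

theorem pvFindW_dec (num w : Nat) (hw : 1 ≤ w) (h : 42 ^ w ≤ num) :
    num + 1 - 42 ^ (2 * w) < num + 1 - 42 ^ w := by
  have h1 : 42 ^ 1 ≤ 42 ^ w := Nat.pow_le_pow_right (by omega) hw
  have h2 : 42 ^ (2 * w) = 42 ^ w * 42 ^ w := by rw [two_mul, pow_add]
  have h3 : 42 * 42 ^ w ≤ 42 ^ w * 42 ^ w := Nat.mul_le_mul_right _ (by omega)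
  omega

def pvFindW (num w : Nat) (hw : 1 ≤ w) : Nat :=
  if h : 42 ^ w ≤ num then pvFindW num (2 * w) (pvFindW_le w hw) else w
termination_by num + 1 - 42 ^ w
decreasing_by exact pvFindW_dec num w hw h

-- def rec(n, w): if w == 1: return alphabet[n]; h = w // 2; hi, lo = divmod(n, 42 ** h);
--                return rec(hi, h) + rec(lo, h)
-- (the w = 0 branch is unreachable from the top-level call, added only for totality)
def pvRecB (n w : Nat) : List Char :=
  if w = 1 then [pvDigitChar n]
  else if h0 : w = 0 then []
  else pvRecB (n / 42 ^ (w / 2)) (w / 2) ++ pvRecB (n % 42 ^ (w / 2)) (w / 2)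
termination_by w
decreasing_by all_goals
  exact Nat.div_lt_self (Nat.pos_of_ne_zero h0) (Nat.lt_of_sub_eq_succ rfl)

def pvFindW1 (num : Nat) : Nat := pvFindW num 1 (le_refl 1)

-- s = rec(num, w).lstrip(alphabet[0]); return s if s else alphabet[0]
def textToBase42_alt (text : String) : String :=
  if (pvRecB (pvFromBytes text) (pvFindW1 (pvFromBytes text))).dropWhile (fun c => c = '0') = []
  then String.mk [pvDigitChar 0]
  else String.mk ((pvRecB (pvFromBytes text) (pvFindW1 (pvFromBytes text))).dropWhile (fun c => c = '0'))

-- ===== PRECONDITION & SPEC =====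
def Spec_textToBase42 (text : String) (out : String) : Prop := out = textToBase42_alt text
instance (text : String) (out : String) : Decidable (Spec_textToBase42 text out) := by unfold Spec_textToBase42; infer_instance

-- ===== CLAIM (what is proved, stated in full; the proofs are below) =====
def Claim_equal_textToBase42 : Prop := ∀ (text : String), Dom_textToBase42 text → Spec_textToBase42 text (textToBase42 text)

-- ===== LEMMAS AND PROOFS =====

-- canonical big-endian base-42 digit characters of n ([] for n = 0)
def pvDigs (n : Nat) : List Char := (Nat.digits 42 n).reverse.map pvDigitChar

theorem pvDigs_zero : pvDigs 0 = [] := by simp [pvDigs]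

theorem pvDigs_pos {n : Nat} (h : 0 < n) :
    pvDigs n = pvDigs (n / 42) ++ [pvDigitChar (n % 42)] := by
  unfold pvDigs
  rw [Nat.digits_def' (by norm_num : 1 < 42) h]
  simp

theorem pvLoopA_eq (n : Nat) : ∀ acc, pvLoopA n acc = pvDigs n ++ acc := by
  induction n using Nat.strong_induction_on with
  | _ n ih =>
    intro acc
    rw [pvLoopA]
    by_cases h : 0 < n
    · rw [dif_pos h, ih (n / 42) (Nat.div_lt_self h (by norm_num)),
        pvDigs_pos h]
      simp
    · have : n = 0 := by omega
      subst this
      simp [pvDigs_zero]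

-- exactly-k-digit big-endian representation of n (low digit last)
def pvPad : Nat → Nat → List Char
  | 0, _ => []
  | k + 1, n => pvPad k (n / 42) ++ [pvDigitChar (n % 42)]

theorem pvPad_split (a b n : Nat) :
    pvPad (a + b) n = pvPad a (n / 42 ^ b) ++ pvPad b (n % 42 ^ b) := by
  induction b generalizing n with
  | zero => simp [pvPad]
  | succ b ih =>
    have e1 : n / 42 / 42 ^ b = n / 42 ^ (b + 1) := by
      rw [Nat.div_div_eq_div_mul, pow_succ, mul_comm]
    have e2 : n % 42 ^ (b + 1) % 42 = n % 42 := by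
      exact Nat.mod_mod_of_dvd n (dvd_pow_self 42 (by omega))
    have e3 : n % 42 ^ (b + 1) / 42 = n / 42 % 42 ^ b := by
      rw [pow_succ, mul_comm]
      exact Nat.mod_mul_right_div_self n 42 (42 ^ b)
    show pvPad (a + b) (n / 42) ++ [pvDigitChar (n % 42)] = _
    rw [ih (n / 42), e1]
    show _ = pvPad a (n / 42 ^ (b + 1)) ++
        (pvPad b (n % 42 ^ (b + 1) / 42) ++ [pvDigitChar (n % 42 ^ (b + 1) % 42)])
    rw [e2, e3, List.append_assoc]

theorem pvRecB_eq_pad (k : Nat) : ∀ n, n < 42 ^ 2 ^ k → pvRecB n (2 ^ k) = pvPad (2 ^ k) n := by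
  induction k with
  | zero =>
    intro n hn
    rw [pvRecB]
    simp only [pow_zero]
    simp [pvPad, Nat.mod_eq_of_lt (by simpa using hn)]
  | succ k ih =>
    intro n hn
    have hpow : (0:Nat) < 2 ^ k := by positivity
    have h1 : 2 ^ (k + 1) ≠ 1 := by
      have : 2 ^ (k + 1) ≥ 2 := by
        calc 2 ^ (k+1) ≥ 2 ^ 1 := Nat.pow_le_pow_right (by norm_num) (by omega)
        _ = 2 := by norm_num
      omega
    have h0 : 2 ^ (k + 1) ≠ 0 := by positivity
    have hhalf : 2 ^ (k + 1) / 2 = 2 ^ k := by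
      rw [pow_succ, Nat.mul_div_cancel _ (by norm_num)]
    rw [pvRecB, if_neg h1, dif_neg h0, hhalf]
    have hsplit : 2 ^ (k + 1) = 2 ^ k + 2 ^ k := by rw [pow_succ]; ring
    have hbound : 42 ^ 2 ^ (k + 1) = 42 ^ 2 ^ k * 42 ^ 2 ^ k := by
      rw [hsplit, pow_add]
    have hhi : n / 42 ^ 2 ^ k < 42 ^ 2 ^ k := by
      apply Nat.div_lt_of_lt_mul
      rw [← hbound]; exact hn
    have hlo : n % 42 ^ 2 ^ k < 42 ^ 2 ^ k := Nat.mod_lt _ (by positivity)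
    rw [ih _ hhi, ih _ hlo, hsplit, pvPad_split]

theorem pvPad_eq_replicate_digs (w n : Nat) (h : (Nat.digits 42 n).length ≤ w) :
    pvPad w n = List.replicate (w - (Nat.digits 42 n).length) '0' ++ pvDigs n := by
  induction w generalizing n with
  | zero =>
    have : Nat.digits 42 n = [] := List.eq_nil_of_length_eq_zero (by omega)
    have hn : n = 0 := (Nat.digits_eq_nil_iff_eq_zero).1 this
    subst hn; simp [pvPad, pvDigs]
  | succ w ih =>
    by_cases hn : 0 < n
    · have hd : Nat.digits 42 n = n % 42 :: Nat.digits 42 (n / 42) :=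
        Nat.digits_def' (by norm_num) hn
      have hlen : (Nat.digits 42 (n / 42)).length ≤ w := by
        rw [hd] at h; simpa using h
      show pvPad w (n / 42) ++ [pvDigitChar (n % 42)] = _
      rw [ih _ hlen, pvDigs_pos hn, hd]
      simp [List.append_assoc]
    · have hn0 : n = 0 := by omega
      subst hn0
      show pvPad w 0 ++ [pvDigitChar (0 % 42)] = _
      rw [ih 0 (by simp)]
      simp [pvDigs_zero, pvDigitChar, pvAlphabet, ← List.replicate_succ']
  
theorem dropWhile_replicate_zero (k : Nat) (s : List Char) :
    List.dropWhile (fun c => decide (c = '0')) (List.replicate k '0' ++ s) =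
    List.dropWhile (fun c => decide (c = '0')) s := by
  induction k with
  | zero => simp
  | succ k ih => simp [List.replicate_succ]

theorem pvDigitChar_ne_zero {d : Nat} (h1 : 0 < d) (h2 : d < 42) : pvDigitChar d ≠ '0' := by
  interval_cases d <;> decide

theorem dropWhile_digs (n : Nat) :
    List.dropWhile (fun c => decide (c = '0')) (pvDigs n) = pvDigs n := by
  by_cases hn : 0 < n
  · have hne : Nat.digits 42 n ≠ [] := Nat.digits_ne_nil_iff_ne_zero.2 (by omega)
    have hrev : (Nat.digits 42 n).reverse ≠ [] := by simpa using hne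
    obtain ⟨d, t, hdt⟩ := List.exists_cons_of_ne_nil hrev
    have hdmem : d ∈ Nat.digits 42 n := by
      have : d ∈ (Nat.digits 42 n).reverse := by rw [hdt]; exact List.mem_cons_self
      simpa using this
    have hdlt : d < 42 := Nat.digits_lt_base (by norm_num) hdmem
    have hdpos : 0 < d := by
      have hgl : (Nat.digits 42 n).getLast hne = d := by
        rw [← List.head_reverse hrev]; simp [hdt]
      have h0 : (Nat.digits 42 n).getLast hne ≠ 0 := by
        have := Nat.getLast_digit_ne_zero 42 (m := n) (by omega)
        exact this
      rw [hgl] at h0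
      omega
    unfold pvDigs
    rw [hdt]
    simp [pvDigitChar_ne_zero hdpos hdlt]
  · have : n = 0 := by omega
    subst this; simp [pvDigs_zero]

theorem pvFindW_spec (num w : Nat) (hw : 1 ≤ w) :
    (∃ k, pvFindW num w hw = w * 2 ^ k) ∧ num < 42 ^ pvFindW num w hw := by
  fun_induction pvFindW num w hw with
  | case1 w hw h ih =>
    obtain ⟨⟨k, hk⟩, hlt⟩ := ih
    exact ⟨⟨k + 1, by rw [hk]; ring⟩, hlt⟩
  | case2 w hw h =>
    exact ⟨⟨0, by ring⟩, by omega⟩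

-- ===== VERDICT (by name: the statement is the Claim_ definition above) =====
theorem pvFindW1_spec (num : Nat) :
    (∃ k, pvFindW1 num = 2 ^ k) ∧ num < 42 ^ pvFindW1 num := by
  obtain ⟨⟨k, hk⟩, hlt⟩ := pvFindW_spec num 1 (le_refl 1)
  exact ⟨⟨k, by rw [pvFindW1, hk]; ring⟩, by rw [pvFindW1]; exact hlt⟩

theorem textToBase42_spec : Claim_equal_textToBase42 := by
  intro text _
  unfold Spec_textToBase42 textToBase42 textToBase42_alt
  obtain ⟨⟨k, hk⟩, hlt⟩ := pvFindW1_spec (pvFromBytes text)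
  set num := pvFromBytes text with hnum
  set w := pvFindW1 num with hw
  have hwk : w = 2 ^ k := hk
  have hlen : (Nat.digits 42 num).length ≤ w :=
    (Nat.digits_length_le_iff (by norm_num) num).2 hlt
  have hrec : pvRecB num w = pvPad w num := by
    rw [hwk]; exact pvRecB_eq_pad k num (hwk ▸ hlt)
  have hstrip : (pvRecB num w).dropWhile (fun c => decide (c = '0')) = pvDigs num := by
    rw [hrec, pvPad_eq_replicate_digs w num hlen,
      dropWhile_replicate_zero, dropWhile_digs]
  rw [hstrip]
  by_cases h0 : num = 0
  · rw [if_pos h0, h0, pvDigs_zero, if_pos rfl]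
  · have hdne : pvDigs num ≠ [] := by
      unfold pvDigs
      simp [Nat.digits_ne_nil_iff_ne_zero.2 h0]
    rw [if_neg h0, if_neg hdne, pvLoopA_eq, List.append_nil]
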